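-- pv_equiv track=rewrite | github.com/maath911/clipviral | main.py | _make_hashtags_fallback
-- ===== SOURCE A (Python) =====
-- def _make_hashtags_fallback(video_title, niche=""):
--     base=["#fyp","#pourtoi","#viral","#tiktok","#foryou"]
--     t=(video_title+" "+niche).lower()
--     if any(k in t for k in ["mindset","motivation","discipline","success","mental","reussite"]): extra=["#mindset","#motivation","#developpementpersonnel","#success","#mentality"]
--     elif any(k in t for k in ["business","entrepreneur","argent","finance","invest"]): extra=["#business","#entrepreneur","#finance","#argent","#investissement"]
--     elif any(k in t for k in ["podcast","interview","debat"]): extra=["#podcast","#interview","#france","#culture","#interessant"]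
--     else: extra=["#interesting","#watch","#explore","#content","#trending"]
--     return base+extra[:5]
-- ===== SOURCE B (Python) =====
-- _KW = {
--     "mindset": 0, "motivation": 0, "discipline": 0, "success": 0, "mental": 0, "reussite": 0,
--     "business": 1, "entrepreneur": 1, "argent": 1, "finance": 1, "invest": 1,
--     "podcast": 2, "interview": 2, "debat": 2,
-- }
--
-- _TAGS = [
--     ["#mindset", "#motivation", "#developpementpersonnel", "#success", "#mentality"],
--     ["#business", "#entrepreneur", "#finance", "#argent", "#investissement"],
--     ["#podcast", "#interview", "#france", "#culture", "#interessant"],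
--     ["#interesting", "#watch", "#explore", "#content", "#trending"],
-- ]
--
-- def _make_hashtags_fallback(video_title, niche=""):
--     t = (video_title + " " + niche).lower()
--     cat = min((i for k, i in _KW.items() if k in t), default=3)
--     return ["#fyp", "#pourtoi", "#viral", "#tiktok", "#foryou"] + _TAGS[cat]
-- ===== Notes on version B (the rewrite author's own statement) =====
-- stated objective: alternative
-- what changed: Replaces the first-match if/elif chain over keyword groups by a flat keyword-to-priority map: B scans all keywords once, takes the minimum priority among all matches (default 3), and selects the tag list by that index.
import Mathlib
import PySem

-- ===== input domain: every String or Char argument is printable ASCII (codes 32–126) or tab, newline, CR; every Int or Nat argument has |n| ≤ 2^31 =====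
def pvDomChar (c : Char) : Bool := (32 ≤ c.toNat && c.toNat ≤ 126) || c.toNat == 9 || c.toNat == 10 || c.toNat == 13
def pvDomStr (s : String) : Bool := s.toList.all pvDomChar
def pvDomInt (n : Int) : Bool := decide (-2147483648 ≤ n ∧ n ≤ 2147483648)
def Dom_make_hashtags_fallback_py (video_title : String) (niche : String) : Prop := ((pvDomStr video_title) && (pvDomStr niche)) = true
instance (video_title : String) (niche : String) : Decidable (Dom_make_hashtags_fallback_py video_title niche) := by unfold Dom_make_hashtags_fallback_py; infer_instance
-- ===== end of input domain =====

-- B replaces A's first-match if/elif chain by a flat keyword→priority map whose minimum matched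
-- priority selects the tag list (objective: alternative); same return value.

-- ===== PORT A =====
def make_hashtags_fallback_py (video_title : String) (niche : String) : List String :=
  let base := ["#fyp", "#pourtoi", "#viral", "#tiktok", "#foryou"]
  let t := PySem.Str.lower (video_title ++ " " ++ niche)
  let extra :=
    if (["mindset", "motivation", "discipline", "success", "mental", "reussite"]).any
         (fun k => PySem.Str.isIn k t) then
      ["#mindset", "#motivation", "#developpementpersonnel", "#success", "#mentality"]
    else if (["business", "entrepreneur", "argent", "finance", "invest"]).any
         (fun k => PySem.Str.isIn k t) then
      ["#business", "#entrepreneur", "#finance", "#argent", "#investissement"]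
    else if (["podcast", "interview", "debat"]).any
         (fun k => PySem.Str.isIn k t) then
      ["#podcast", "#interview", "#france", "#culture", "#interessant"]
    else
      ["#interesting", "#watch", "#explore", "#content", "#trending"]
  base ++ PySem.List.slice extra none (some 5)

-- ===== PORT B =====
-- the flat keyword → priority dict of Source B, in insertion order
def pvKW : List (String × Int) :=
  [("mindset", 0), ("motivation", 0), ("discipline", 0), ("success", 0), ("mental", 0), ("reussite", 0),
   ("business", 1), ("entrepreneur", 1), ("argent", 1), ("finance", 1), ("invest", 1),
   ("podcast", 2), ("interview", 2), ("debat", 2)]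

def pvTags : List (List String) :=
  [["#mindset", "#motivation", "#developpementpersonnel", "#success", "#mentality"],
   ["#business", "#entrepreneur", "#finance", "#argent", "#investissement"],
   ["#podcast", "#interview", "#france", "#culture", "#interessant"],
   ["#interesting", "#watch", "#explore", "#content", "#trending"]]

def make_hashtags_fallback_py_alt (video_title : String) (niche : String) : List String :=
  let t := PySem.Str.lower (video_title ++ " " ++ niche)
  -- min((i for k, i in _KW.items() if k in t), default=3) as a fold
  let cat := pvKW.foldl (fun m p => if PySem.Str.isIn p.1 t then min m p.2 else m) 3
  -- _TAGS[cat]: cat is always in {0,1,2,3}, so pyGet? is some; .getD [] only totalizes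
  ["#fyp", "#pourtoi", "#viral", "#tiktok", "#foryou"] ++ (PySem.List.pyGet? pvTags cat).getD []

-- ===== PRECONDITION & SPEC =====
def Spec_make_hashtags_fallback_py (video_title : String) (niche : String) (out : List String) : Prop := out = make_hashtags_fallback_py_alt video_title niche
instance (video_title : String) (niche : String) (out : List String) : Decidable (Spec_make_hashtags_fallback_py video_title niche out) := by unfold Spec_make_hashtags_fallback_py; infer_instance

-- ===== CLAIM (what is proved, stated in full; the proofs are below) =====
def Claim_equal_make_hashtags_fallback_py : Prop := ∀ (video_title : String) (niche : String), Dom_make_hashtags_fallback_py video_title niche → Spec_make_hashtags_fallback_py video_title niche (make_hashtags_fallback_py video_title niche)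

-- ===== LEMMAS AND PROOFS =====

-- folding the min over a group of keywords that all carry the same priority c
theorem pv_foldl_min_group (t : String) (ks : List String) (c acc : Int) :
    (ks.map (fun k => (k, c))).foldl (fun m p => if PySem.Str.isIn p.1 t then min m p.2 else m) acc
      = if ks.any (fun k => PySem.Str.isIn k t) then min acc c else acc := by
  induction ks generalizing acc with
  | nil => simp
  | cons k rest ih =>
    simp only [List.map_cons, List.foldl_cons, List.any_cons, ih]
    rcases Bool.eq_false_or_eq_true (PySem.Str.isIn k t) with h | h <;>
      rcases Bool.eq_false_or_eq_true (rest.any fun k => PySem.Str.isIn k t) with hr | hr <;>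
        simp only [h, hr, Bool.true_or, Bool.false_or] <;> simp

-- ===== VERDICT (by name: the statement is the Claim_ definition above) =====
theorem make_hashtags_fallback_py_spec : Claim_equal_make_hashtags_fallback_py := by
  intro vt ni _
  unfold Spec_make_hashtags_fallback_py make_hashtags_fallback_py make_hashtags_fallback_py_alt
  set t := PySem.Str.lower (vt ++ " " ++ ni) with ht
  clear_value t
  have hkw : pvKW =
      (["mindset", "motivation", "discipline", "success", "mental", "reussite"].map (fun k => (k, (0 : Int))))
      ++ (["business", "entrepreneur", "argent", "finance", "invest"].map (fun k => (k, (1 : Int))))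
      ++ (["podcast", "interview", "debat"].map (fun k => (k, (2 : Int)))) := by
    rfl
  rw [hkw]
  simp only [List.foldl_append, pv_foldl_min_group]
  rcases Bool.eq_false_or_eq_true ((["mindset", "motivation", "discipline", "success", "mental", "reussite"]).any (fun k => PySem.Str.isIn k t)) with h1 | h1 <;>
  rcases Bool.eq_false_or_eq_true ((["business", "entrepreneur", "argent", "finance", "invest"]).any (fun k => PySem.Str.isIn k t)) with h2 | h2 <;>
  rcases Bool.eq_false_or_eq_true ((["podcast", "interview", "debat"]).any (fun k => PySem.Str.isIn k t)) with h3 | h3 <;>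
  simp only [h1, h2, h3] <;> decide
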